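-- pv_equiv track=rewrite | github.com/BlinduAndrada/Python-labs | Homework2/Homework3/ex9.py | check_view
-- ===== SOURCE A (Python) =====
-- def check_view(matrix):
--     rows = len(matrix)
--     blocked_seats = []
--
--     if rows == 0:
--         return []
--
--     cols = len(matrix[0])
--
--     for col in range(cols):
--         current_max_height = matrix[0][col]
--
--         for row in range(1, rows):
--             height = matrix[row][col]
--
--             if height <= current_max_height:
--                 blocked_seats.append((row, col))
--             else:
--                 current_max_height = height
--
--     return blocked_seats
-- ===== SOURCE B (Python) =====
-- def check_view(matrix):
--     # Single row-major pass keeping a per-column (running max, blocked bucket) state;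
--     # buckets are concatenated in column order to give the same column-major output as A.
--     if not matrix:
--         return []
--     state = [(h, []) for h in matrix[0]]
--     for row, r in enumerate(matrix[1:], start=1):
--         state = [
--             (m, b + [(row, col)]) if r[col] <= m else (r[col], b)
--             for col, (m, b) in enumerate(state)
--         ]
--     return [seat for _, b in state for seat in b]
-- ===== Notes on version B (the rewrite author's own statement) =====
-- stated objective: alternative
-- what changed: A re-scans the matrix once per column (column-major nested loops); B makes a single row-major pass over the matrix maintaining a per-column (running max, bucket) state and concatenates the buckets in column order.
-- outside the precondition, e.g. on check_view([[1, 2], [3]]): A raises IndexError, B raises IndexError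
import Mathlib
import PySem

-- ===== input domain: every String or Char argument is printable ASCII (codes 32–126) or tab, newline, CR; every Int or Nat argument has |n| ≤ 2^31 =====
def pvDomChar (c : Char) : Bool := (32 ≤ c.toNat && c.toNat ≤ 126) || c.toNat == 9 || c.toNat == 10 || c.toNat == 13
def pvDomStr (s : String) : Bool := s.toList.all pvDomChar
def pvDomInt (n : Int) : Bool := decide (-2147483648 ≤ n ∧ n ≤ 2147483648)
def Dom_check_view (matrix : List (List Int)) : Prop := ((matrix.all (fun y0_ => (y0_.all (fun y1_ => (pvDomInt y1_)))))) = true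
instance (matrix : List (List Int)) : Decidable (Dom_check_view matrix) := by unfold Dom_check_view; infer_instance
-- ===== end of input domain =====

-- B replaces A's column-major re-scans of the matrix by a single row-major pass with a
-- per-column (running max, bucket) state; same output, alternative algorithm (no speed claim).


-- ===== PORT A =====
def check_view (matrix : List (List Int)) : List (Int × Int) :=
  let rows : Int := matrix.length
  if rows = 0 then []
  else
    let cols : Int := (PySem.List.pyGetD matrix 0 []).length
    (PySem.List.pyRange 0 cols 1).foldl (fun acc col =>
      ((PySem.List.pyRange 1 rows 1).foldl
        (fun (st : Int × List (Int × Int)) row =>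
          let height := PySem.List.pyGetD (PySem.List.pyGetD matrix row []) col 0
          if height ≤ st.1 then (st.1, st.2 ++ [(row, col)])
          else (height, st.2))
        (PySem.List.pyGetD (PySem.List.pyGetD matrix 0 []) col 0, acc)).2) []

-- ===== PORT B =====
def check_view_alt (matrix : List (List Int)) : List (Int × Int) :=
  match matrix with
  | [] => []
  | r0 :: rest =>
    let state0 : List (Int × List (Int × Int)) := r0.map (fun h => (h, []))
    let final := (PySem.List.enumerate rest 1).foldl (fun state p =>
      (PySem.List.enumerate state 0).map (fun q =>
        if PySem.List.pyGetD p.2 q.1 0 ≤ q.2.1 then (q.2.1, q.2.2 ++ [(p.1, q.1)])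
        else (PySem.List.pyGetD p.2 q.1 0, q.2.2))) state0
    final.flatMap (fun q => q.2)

-- ===== PRECONDITION & SPEC =====
-- Pre_ excludes ragged matrices in which some row is shorter than row 0: there Python A
-- raises IndexError (and Python B raises too).
def Pre_check_view (matrix : List (List Int)) : Prop :=
  ∀ r ∈ matrix, (matrix.headD []).length ≤ r.length
instance (matrix : List (List Int)) : Decidable (Pre_check_view matrix) := by unfold Pre_check_view; infer_instance

def pvWitness_check_view : List (List Int) := [[1, 2], [3, 1]]

def Spec_check_view (matrix : List (List Int)) (out : List (Int × Int)) : Prop := out = check_view_alt matrix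
instance (matrix : List (List Int)) (out : List (Int × Int)) : Decidable (Spec_check_view matrix out) := by unfold Spec_check_view; infer_instance

-- ===== CLAIM (what is proved, stated in full; the proofs are below) =====
def Claim_equal_check_view : Prop := ∀ (matrix : List (List Int)), Dom_check_view matrix → Pre_check_view matrix → Spec_check_view matrix (check_view matrix)

-- ===== LEMMAS AND PROOFS =====

-- one step of the per-column scan: p = (row index, row), c = column, mb = (max, bucket)
def colStep (p : Int × List Int) (c : Int) (mb : Int × List (Int × Int)) : Int × List (Int × Int) :=
  if PySem.List.pyGetD p.2 c 0 ≤ mb.1 then (mb.1, mb.2 ++ [(p.1, c)])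
  else (PySem.List.pyGetD p.2 c 0, mb.2)

def colFold (L : List (Int × List Int)) (c : Int) (st : Int × List (Int × Int)) : Int × List (Int × Int) :=
  L.foldl (fun mb p => colStep p c mb) st

theorem colFold_cons (p : Int × List Int) (L : List (Int × List Int)) (c : Int) (st : Int × List (Int × Int)) :
    colFold (p :: L) c st = colFold L c (colStep p c st) := rfl

theorem colFold_acc (L : List (Int × List Int)) (c : Int) :
    ∀ (m : Int) (l acc : List (Int × Int)),
      colFold L c (m, acc ++ l) = ((colFold L c (m, l)).1, acc ++ (colFold L c (m, l)).2) := by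
  induction L with
  | nil => intro m l acc; simp [colFold]
  | cons p L ih =>
    intro m l acc
    rw [colFold_cons, colFold_cons]
    unfold colStep
    split_ifs with h
    · rw [List.append_assoc]; exact ih m (l ++ [(p.1, c)]) acc
    · exact ih _ l acc

theorem A_as_colFold (r0 : List Int) (rest : List (List Int)) :
    check_view (r0 :: rest) =
      (PySem.List.pyRange 0 (r0.length : Int) 1).flatMap
        (fun c => (colFold (PySem.List.enumerate rest 1) c (PySem.List.pyGetD r0 c 0, [])).2) := by
  have hrows : ((r0 :: rest).length : Int) ≠ 0 := by
    simp only [List.length_cons]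
    push_cast
    omega
  have h1 : PySem.List.pyRange 1 ((r0 :: rest).length : Int) 1
      = (PySem.List.enumerate rest 1).map (·.1) := by
    rw [PySem.List.map_fst_enumerate]
    congr 1
    push_cast [List.length_cons]
    ring
  unfold check_view
  simp only [if_neg hrows, PySem.List.pyGetD_zero_cons, h1, List.foldl_map]
  have hbody : ∀ (c : Int) (st : Int × List (Int × Int)) (p : Int × List Int),
      p ∈ PySem.List.enumerate rest 1 →
      (if PySem.List.pyGetD (PySem.List.pyGetD (r0 :: rest) p.1 []) c 0 ≤ st.1
        then (st.1, st.2 ++ [(p.1, c)])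
        else (PySem.List.pyGetD (PySem.List.pyGetD (r0 :: rest) p.1 []) c 0, st.2))
        = colStep p c st := by
    intro c st p hp
    rcases (PySem.List.mem_enumerate_iff _ _ _).1 hp with ⟨k, hk, rfl⟩
    have : PySem.List.pyGetD (r0 :: rest) (1 + (k : Int)) [] = rest[k] := by
      have h2 : (1 + (k : Int)) = ((k + 1 : Nat) : Int) := by push_cast; ring
      rw [h2, PySem.List.pyGetD_natCast]
      simp [List.getD_eq_getElem?_getD, hk]
    simp only [this, colStep]
  have hfold : ∀ (c : Int) (acc : List (Int × Int)),
      (PySem.List.enumerate rest 1).foldl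
        (fun (st : Int × List (Int × Int)) p =>
          if PySem.List.pyGetD (PySem.List.pyGetD (r0 :: rest) p.1 []) c 0 ≤ st.1
          then (st.1, st.2 ++ [(p.1, c)])
          else (PySem.List.pyGetD (PySem.List.pyGetD (r0 :: rest) p.1 []) c 0, st.2))
        (PySem.List.pyGetD r0 c 0, acc)
      = colFold (PySem.List.enumerate rest 1) c (PySem.List.pyGetD r0 c 0, acc) := by
    intro c acc
    exact PySem.List.foldl_congr_mem _ _ _ _ (fun st p hp => hbody c st p hp)
  calc (PySem.List.pyRange 0 (r0.length : Int) 1).foldl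
        (fun acc c =>
          ((PySem.List.enumerate rest 1).foldl
            (fun (st : Int × List (Int × Int)) p =>
              if PySem.List.pyGetD (PySem.List.pyGetD (r0 :: rest) p.1 []) c 0 ≤ st.1
              then (st.1, st.2 ++ [(p.1, c)])
              else (PySem.List.pyGetD (PySem.List.pyGetD (r0 :: rest) p.1 []) c 0, st.2))
            (PySem.List.pyGetD r0 c 0, acc)).2) []
      = (PySem.List.pyRange 0 (r0.length : Int) 1).foldl
          (fun acc c => acc ++ (colFold (PySem.List.enumerate rest 1) c (PySem.List.pyGetD r0 c 0, [])).2) [] := by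
        apply PySem.List.foldl_congr_mem
        intro acc c hc
        rw [hfold c acc]
        have := colFold_acc (PySem.List.enumerate rest 1) c (PySem.List.pyGetD r0 c 0) [] acc
        simpa using congrArg Prod.snd this
    _ = _ := by
        rw [PySem.List.foldl_append_eq_flatMap]
        simp

theorem enum_map_pyRange {α : Type} (n : Nat) (f : Int → α) :
    PySem.List.enumerate ((PySem.List.pyRange 0 (n : Int) 1).map f) 0
      = (PySem.List.pyRange 0 (n : Int) 1).map (fun c => (c, f c)) := by
  apply List.ext_getElem
  · simp [PySem.List.length_enumerate]
  · intro k h1 h2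
    have hk : k < (PySem.List.pyRange 0 (n : Int) 1).length := by
      simpa [PySem.List.length_enumerate] using h1
    rw [PySem.List.getElem_enumerate]
    simp only [List.getElem_map]
    rw [PySem.List.getElem_pyRange_one _ _ _ hk]

theorem B_fold (L : List (Int × List Int)) :
    ∀ (n : Nat) (f : Int → Int × List (Int × Int)),
      L.foldl (fun state p =>
          (PySem.List.enumerate state 0).map (fun q => colStep p q.1 q.2))
        ((PySem.List.pyRange 0 (n : Int) 1).map f)
      = (PySem.List.pyRange 0 (n : Int) 1).map (fun c => colFold L c (f c)) := by
  induction L with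
  | nil => intro n f; simp [colFold]
  | cons p L ih =>
    intro n f
    simp only [List.foldl_cons, enum_map_pyRange, List.map_map]
    have : ((fun q : Int × (Int × List (Int × Int)) => colStep p q.1 q.2) ∘ fun c => (c, f c))
        = fun c => colStep p c (f c) := rfl
    rw [this, ih n (fun c => colStep p c (f c))]
    simp [colFold_cons]

theorem B_as_colFold (r0 : List Int) (rest : List (List Int)) :
    check_view_alt (r0 :: rest) =
      (PySem.List.pyRange 0 (r0.length : Int) 1).flatMap
        (fun c => (colFold (PySem.List.enumerate rest 1) c (PySem.List.pyGetD r0 c 0, [])).2) := by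
  unfold check_view_alt
  have hstep : (fun (state : List (Int × List (Int × Int))) (p : Int × List Int) =>
      (PySem.List.enumerate state 0).map (fun q =>
        if PySem.List.pyGetD p.2 q.1 0 ≤ q.2.1 then (q.2.1, q.2.2 ++ [(p.1, q.1)])
        else (PySem.List.pyGetD p.2 q.1 0, q.2.2)))
      = fun state p => (PySem.List.enumerate state 0).map (fun q => colStep p q.1 q.2) := rfl
  have hinit : r0.map (fun h => ((h, []) : Int × List (Int × Int)))
      = (PySem.List.pyRange 0 (r0.length : Int) 1).map
          (fun c => (PySem.List.pyGetD r0 c 0, ([] : List (Int × Int)))) := by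
    conv_rhs =>
      rw [show (fun c => (PySem.List.pyGetD r0 c 0, ([] : List (Int × Int))))
            = (fun h => ((h, []) : Int × List (Int × Int))) ∘ (fun c => PySem.List.pyGetD r0 c 0) from rfl]
    rw [← List.map_map, PySem.List.map_pyGetD_pyRange_zero']
  simp only [hstep, hinit, B_fold, List.flatMap_map]

-- ===== VERDICT (by name: the statement is the Claim_ definition above) =====
theorem check_view_spec : Claim_equal_check_view := by
  intro matrix _ _
  unfold Spec_check_view
  cases matrix with
  | nil => rfl
  | cons r0 rest => rw [A_as_colFold, B_as_colFold]
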